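-- pv_equiv track=rewrite | github.com/tomabbot2577/cows-call-intelligence | src/ringcentral/video_sync_job.py | _classify_recording_type
-- ===== SOURCE A (Python) =====
-- def _classify_recording_type(name: str) -> str:
--     """Classify recording based on name."""
--     name_lower = name.lower() if name else ''
--
--     if any(word in name_lower for word in ['training', 'onboard']):
--         return 'training'
--     elif any(word in name_lower for word in ['demo', 'sales', 'prospect']):
--         return 'sales'
--     elif any(word in name_lower for word in ['ticket']):
--         return 'support'
--     elif any(word in name_lower for word in ['interview', 'candidate']):
--         return 'interview'
--     else:
--         return 'meeting'
-- ===== SOURCE B (Python) =====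
-- KEYWORD_LABELS = [
--     ('training', 'training'), ('onboard', 'training'),
--     ('demo', 'sales'), ('sales', 'sales'), ('prospect', 'sales'),
--     ('ticket', 'support'),
--     ('interview', 'interview'), ('candidate', 'interview'),
-- ]
--
-- PRIORITY = ['training', 'sales', 'support', 'interview']
--
--
-- def _classify_recording_type(name: str) -> str:
--     """Scan every position of the name once, collecting the labels of all
--     keywords that start there; then pick the highest-priority label found."""
--     low = name.lower() if name else ''
--     found = set()
--     for i in range(len(low)):
--         for kw, label in KEYWORD_LABELS:
--             if low.startswith(kw, i):
--                 found.add(label)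
--     for label in PRIORITY:
--         if label in found:
--             return label
--     return 'meeting'
-- ===== Notes on version B (the rewrite author's own statement) =====
-- stated objective: alternative
-- what changed: Instead of A's per-keyword if/elif cascade of substring tests, B scans each position of the lowered name once, collects into a set the labels of all keywords starting there, and then returns the first label of a fixed priority list that was collected.
import Mathlib
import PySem

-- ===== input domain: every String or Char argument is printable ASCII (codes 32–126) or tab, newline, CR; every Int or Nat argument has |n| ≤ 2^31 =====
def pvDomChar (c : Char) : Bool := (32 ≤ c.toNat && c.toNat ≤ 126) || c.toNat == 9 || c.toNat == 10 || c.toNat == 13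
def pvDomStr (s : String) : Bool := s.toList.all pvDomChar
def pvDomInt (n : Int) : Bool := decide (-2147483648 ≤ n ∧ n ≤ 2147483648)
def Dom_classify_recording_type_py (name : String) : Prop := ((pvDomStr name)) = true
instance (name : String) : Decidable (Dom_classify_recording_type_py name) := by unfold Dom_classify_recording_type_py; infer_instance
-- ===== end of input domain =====

-- B replaces A's per-keyword if/elif cascade by a single scan over the string's positions that
-- collects the labels of all keywords found into a set, followed by a priority-selection pass
-- (objective: alternative decomposition; same return value).

-- ===== PORT A =====
-- literal transliteration of A's if/elif keyword cascade
def classify_recording_type_py (name : String) : String :=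
  let name_lower := if name = "" then "" else PySem.Str.lower name
  if (["training", "onboard"].any fun word => PySem.Str.isIn word name_lower) then "training"
  else if (["demo", "sales", "prospect"].any fun word => PySem.Str.isIn word name_lower) then "sales"
  else if (["ticket"].any fun word => PySem.Str.isIn word name_lower) then "support"
  else if (["interview", "candidate"].any fun word => PySem.Str.isIn word name_lower) then "interview"
  else "meeting"

-- ===== PORT B =====
def pvKeywordLabels : List (String × String) :=
  [("training", "training"), ("onboard", "training"),
   ("demo", "sales"), ("sales", "sales"), ("prospect", "sales"),
   ("ticket", "support"),
   ("interview", "interview"), ("candidate", "interview")]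

def pvPriority : List String := ["training", "sales", "support", "interview"]

-- low.startswith(kw, i): exact for 0 ≤ i (Python checks kw is a prefix of low[i:])
def pvStartsAt (low : List Char) (kw : String) (i : Int) : Bool :=
  kw.toList.isPrefixOf (low.drop i.toNat)

-- the two nested for-loops building 'found'
def pvFound (low : List Char) : PySem.Set String :=
  (PySem.List.pyRange 0 low.length 1).foldl
    (fun acc i => pvKeywordLabels.foldl
      (fun acc2 p => if pvStartsAt low p.1 i then PySem.Set.add acc2 p.2 else acc2) acc)
    PySem.Set.empty

-- 'for label in PRIORITY: if label in found: return label' with fallback 'meeting'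
def pvPick (found : PySem.Set String) : List String → String
  | [] => "meeting"
  | l :: rest => if PySem.Set.contains found l then l else pvPick found rest

def classify_recording_type_py_alt (name : String) : String :=
  let low := if name = "" then "" else PySem.Str.lower name
  pvPick (pvFound low.toList) pvPriority

-- ===== PRECONDITION & SPEC =====
def Spec_classify_recording_type_py (name : String) (out : String) : Prop := out = classify_recording_type_py_alt name
instance (name : String) (out : String) : Decidable (Spec_classify_recording_type_py name out) := by unfold Spec_classify_recording_type_py; infer_instance

-- ===== CLAIM (what is proved, stated in full; the proofs are below) =====
def Claim_equal_classify_recording_type_py : Prop := ∀ (name : String), Dom_classify_recording_type_py name → Spec_classify_recording_type_py name (classify_recording_type_py name)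

-- ===== LEMMAS AND PROOFS =====

-- membership after the inner loop over the keyword table
theorem pv_mem_inner (low : List Char) (i : Int) (tbl : List (String × String))
    (acc : PySem.Set String) (x : String) :
    x ∈ tbl.foldl (fun acc2 p => if pvStartsAt low p.1 i then PySem.Set.add acc2 p.2 else acc2) acc ↔
      x ∈ acc ∨ ∃ p ∈ tbl, pvStartsAt low p.1 i = true ∧ p.2 = x := by
  induction tbl generalizing acc with
  | nil => simp
  | cons a t ih =>
    simp only [List.foldl_cons, ih, List.mem_cons]
    split_ifs with h
    · simp only [PySem.Set.mem_add]
      constructor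
      · rintro ((hx | rfl) | ⟨p, hp, hc, hv⟩)
        · exact Or.inl hx
        · exact Or.inr ⟨a, Or.inl rfl, h, rfl⟩
        · exact Or.inr ⟨p, Or.inr hp, hc, hv⟩
      · rintro (hx | ⟨p, (rfl | hp), hc, hv⟩)
        · exact Or.inl (Or.inl hx)
        · exact Or.inl (Or.inr hv.symm)
        · exact Or.inr ⟨p, hp, hc, hv⟩
    · constructor
      · rintro (hx | ⟨p, hp, hc, hv⟩)
        · exact Or.inl hx
        · exact Or.inr ⟨p, Or.inr hp, hc, hv⟩
      · rintro (hx | ⟨p, (rfl | hp), hc, hv⟩)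
        · exact Or.inl hx
        · exact absurd hc h
        · exact Or.inr ⟨p, hp, hc, hv⟩

-- membership after the outer loop over the positions
theorem pv_mem_outer (low : List Char) (l : List Int) (acc : PySem.Set String) (x : String) :
    x ∈ l.foldl (fun acc i => pvKeywordLabels.foldl
        (fun acc2 p => if pvStartsAt low p.1 i then PySem.Set.add acc2 p.2 else acc2) acc) acc ↔
      x ∈ acc ∨ ∃ i ∈ l, ∃ p ∈ pvKeywordLabels, pvStartsAt low p.1 i = true ∧ p.2 = x := by
  induction l generalizing acc with
  | nil => simp
  | cons j t ih =>
    simp only [List.foldl_cons, ih, pv_mem_inner, List.mem_cons]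
    constructor
    · rintro ((hx | ⟨p, hp, hc, hv⟩) | ⟨i, hi, p, hp, hc, hv⟩)
      · exact Or.inl hx
      · exact Or.inr ⟨j, Or.inl rfl, p, hp, hc, hv⟩
      · exact Or.inr ⟨i, Or.inr hi, p, hp, hc, hv⟩
    · rintro (hx | ⟨i, (rfl | hi), p, hp, hc, hv⟩)
      · exact Or.inl (Or.inl hx)
      · exact Or.inl (Or.inr ⟨p, hp, hc, hv⟩)
      · exact Or.inr ⟨i, hi, p, hp, hc, hv⟩

-- a nonempty keyword starts at some scanned position iff it is a substring
theorem pv_startsAt_iff_isIn (low : List Char) (kw : String) (hk : kw.toList ≠ []) :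
    (∃ i ∈ PySem.List.pyRange 0 low.length 1, pvStartsAt low kw i = true) ↔
      PySem.Chars.isIn kw.toList low = true := by
  rw [← PySem.Chars.exists_prefix_drop_iff_isIn]
  constructor
  · rintro ⟨i, _, h⟩
    exact ⟨i.toNat, List.isPrefixOf_iff_prefix.mp h⟩
  · rintro ⟨j, hj⟩
    have hjlt : j < low.length := by
      by_contra hge
      rw [List.drop_eq_nil_of_le (by omega)] at hj
      exact hk (List.prefix_nil.mp hj)
    refine ⟨(j : Int), ?_, ?_⟩
    · rw [PySem.List.mem_pyRange_one]
      constructor <;> [positivity; exact_mod_cast hjlt]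
    · simpa [pvStartsAt] using List.isPrefixOf_iff_prefix.mpr hj

theorem pv_mem_found (low : List Char) (x : String) :
    x ∈ pvFound low ↔
      ∃ p ∈ pvKeywordLabels, PySem.Chars.isIn p.1.toList low = true ∧ p.2 = x := by
  unfold pvFound
  rw [pv_mem_outer]
  have hempty : x ∈ (PySem.Set.empty : PySem.Set String) ↔ False := by simp [PySem.Set.empty]
  simp only [hempty, false_or]
  constructor
  · rintro ⟨i, hi, p, hp, hc, hv⟩
    have hk : p.1.toList ≠ [] := by
      fin_cases hp <;> simp
    exact ⟨p, hp, (pv_startsAt_iff_isIn low p.1 hk).mp ⟨i, hi, hc⟩, hv⟩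
  · rintro ⟨p, hp, hin, hv⟩
    have hk : p.1.toList ≠ [] := by
      fin_cases hp <;> simp
    obtain ⟨i, hi, hc⟩ := (pv_startsAt_iff_isIn low p.1 hk).mpr hin
    exact ⟨i, hi, p, hp, hc, hv⟩

-- the four labels' membership in 'found', as Boolean equations
theorem pv_contains_label (low : List Char) (x : String) :
    PySem.Set.contains (pvFound low) x =
      (pvKeywordLabels.any fun p => PySem.Chars.isIn p.1.toList low && (p.2 == x)) := by
  rcases h : (pvKeywordLabels.any fun p => PySem.Chars.isIn p.1.toList low && (p.2 == x)) with _ | _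
  · rw [List.any_eq_false] at h
    rcases hc : PySem.Set.contains (pvFound low) x with _ | _
    · rfl
    · exfalso
      obtain ⟨p, hp, hin, hv⟩ := (pv_mem_found low x).mp ((PySem.Set.contains_iff _ _).mp hc)
      have := h p hp
      rw [hin, hv] at this
      simp at this
  · rw [List.any_eq_true] at h
    obtain ⟨p, hp, hb⟩ := h
    rw [Bool.and_eq_true, beq_iff_eq] at hb
    exact (PySem.Set.contains_iff _ _).mpr ((pv_mem_found low x).mpr ⟨p, hp, hb.1, hb.2⟩)

-- ===== VERDICT (by name: the statement is the Claim_ definition above) =====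
theorem classify_recording_type_py_spec : Claim_equal_classify_recording_type_py := by
  intro name _
  unfold Spec_classify_recording_type_py classify_recording_type_py classify_recording_type_py_alt
  set s := if name = "" then "" else PySem.Str.lower name with hs
  show _ = pvPick (pvFound s.toList) pvPriority
  simp only [pvPriority, pvPick, pv_contains_label, pvKeywordLabels,
    List.any_cons, List.any_nil, PySem.Str.isIn_eq]
  by_cases h1 : PySem.Chars.isIn "training".toList s.toList = true <;>
  by_cases h2 : PySem.Chars.isIn "onboard".toList s.toList = true <;>
  by_cases h3 : PySem.Chars.isIn "demo".toList s.toList = true <;>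
  by_cases h4 : PySem.Chars.isIn "sales".toList s.toList = true <;>
  by_cases h5 : PySem.Chars.isIn "prospect".toList s.toList = true <;>
  by_cases h6 : PySem.Chars.isIn "ticket".toList s.toList = true <;>
  by_cases h7 : PySem.Chars.isIn "interview".toList s.toList = true <;>
  by_cases h8 : PySem.Chars.isIn "candidate".toList s.toList = true <;>
  simp_all
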